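-- pv_equiv track=rewrite | github.com/yiminl18/Octoselector | extract_sql_feature.py | remove_parentheses
-- ===== SOURCE A (Python) =====
-- def remove_parentheses(s):
--     # Remove content within parentheses for simpler splitting of predicates
--     result = ''
--     bracket_level = 0
--     for char in s:
--         if char == '(':
--             bracket_level += 1
--         elif char == ')':
--             bracket_level -= 1
--         elif bracket_level == 0:
--             result += char
--     return result
-- ===== SOURCE B (Python) =====
-- def remove_parentheses(s):
--     # Two-pass: build a prefix-sum table of bracket depth BEFORE each char,
--     # then keep non-paren chars whose pre-level is 0.
--     levels = [0] * (len(s) + 1)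
--     for i, c in enumerate(s):
--         levels[i + 1] = levels[i] + (1 if c == '(' else -1 if c == ')' else 0)
--     return ''.join(c for c, lv in zip(s, levels) if c not in '()' and lv == 0)
-- ===== Notes on version B (the rewrite author's own statement) =====
-- stated objective: alternative
-- what changed: Replaces the single interleaved loop (level counter updated while appending) by two separate passes: a prefix-sum table of bracket depth before each character, then a filtering comprehension keeping non-paren characters whose pre-level is 0.
import Mathlib
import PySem

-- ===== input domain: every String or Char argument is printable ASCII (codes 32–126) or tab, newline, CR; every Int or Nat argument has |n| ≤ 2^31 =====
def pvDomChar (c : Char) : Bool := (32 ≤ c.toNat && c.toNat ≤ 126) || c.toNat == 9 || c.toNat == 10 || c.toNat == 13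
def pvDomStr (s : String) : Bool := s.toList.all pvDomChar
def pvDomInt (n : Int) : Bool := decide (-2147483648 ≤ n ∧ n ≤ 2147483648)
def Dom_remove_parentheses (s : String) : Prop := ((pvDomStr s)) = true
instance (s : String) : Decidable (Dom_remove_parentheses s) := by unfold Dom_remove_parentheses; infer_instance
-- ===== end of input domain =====

-- B replaces A's single interleaved loop by a prefix-sum depth table plus a filtering pass (alternative decomposition, same cost).

-- ===== PORT A =====
-- the for-loop of A: carries the accumulated result and bracket_level, branch order as in A
def pvLoopA : List Char → Int → List Char
  | [], _ => []
  | c :: rest, lvl =>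
    if c = '(' then pvLoopA rest (lvl + 1)
    else if c = ')' then pvLoopA rest (lvl - 1)
    else if lvl = 0 then c :: pvLoopA rest lvl
    else pvLoopA rest lvl

def remove_parentheses (s : String) : String := String.ofList (pvLoopA s.toList 0)

-- ===== PORT B =====
def pvDelta (c : Char) : Int := if c = '(' then 1 else if c = ')' then -1 else 0

def remove_parentheses_alt (s : String) : String :=
  let cs := s.toList
  -- prefix-sum table: depth before each char (scanl = B's levels table; zip truncates to cs.length)
  let levels := List.scanl (· + ·) 0 (cs.map pvDelta)
  String.ofList (((cs.zip levels).filter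
    (fun p => !(p.1 == '(') && !(p.1 == ')') && p.2 == 0)).map Prod.fst)

-- ===== PRECONDITION & SPEC =====
def Spec_remove_parentheses (s : String) (out : String) : Prop := out = remove_parentheses_alt s
instance (s : String) (out : String) : Decidable (Spec_remove_parentheses s out) := by unfold Spec_remove_parentheses; infer_instance

-- ===== CLAIM (what is proved, stated in full; the proofs are below) =====
def Claim_equal_remove_parentheses : Prop := ∀ (s : String), Dom_remove_parentheses s → Spec_remove_parentheses s (remove_parentheses s)

-- ===== LEMMAS AND PROOFS =====
theorem pvLoopA_eq (cs : List Char) : ∀ (lvl : Int),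
    pvLoopA cs lvl =
      ((cs.zip (List.scanl (· + ·) lvl (cs.map pvDelta))).filter
        (fun p => !(p.1 == '(') && !(p.1 == ')') && p.2 == 0)).map Prod.fst := by
  induction cs with
  | nil => intro lvl; rfl
  | cons c rest ih =>
    intro lvl
    simp only [List.map_cons, List.scanl_cons, List.zip_cons_cons, List.filter_cons]
    by_cases h1 : c = '('
    · simp [pvLoopA, h1, pvDelta, ih]
    · by_cases h2 : c = ')'
      · simp [pvLoopA, h2, pvDelta, ih, sub_eq_add_neg]
      · by_cases h3 : lvl = 0
        · simp [pvLoopA, h1, h2, h3, pvDelta, ih]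
        · simp [pvLoopA, h1, h2, h3, pvDelta, ih]

-- ===== VERDICT (by name: the statement is the Claim_ definition above) =====
theorem remove_parentheses_spec : Claim_equal_remove_parentheses := by
  intro s _
  unfold Spec_remove_parentheses remove_parentheses remove_parentheses_alt
  rw [pvLoopA_eq]
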